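-- pv_equiv track=rewrite | github.com/GMcDowellJr/Revit_Fingerprint | tools/label_synthesis/domain_prompts/arrowheads.py | _detect_record_class
-- ===== SOURCE A (Python) =====
-- from typing import Any, Dict, List, Optional
--
-- _SIZEONLY_STYLES = frozenset({
--     "Dot", "Diagonal", "Box", "Loop", "Elevation Target", "Datum triangle"
-- })
--
-- def _detect_record_class(identity_items: List[Dict[str, Any]]) -> str:
--     kv = {
--         item.get("k"): item.get("v")
--         for item in identity_items
--         if item.get("q") == "ok"
--     }
--     style = kv.get("arrowhead.style", "")
--     if style == "Arrow":
--         return "Arrow"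
--     if style == "Heavy end tick mark":
--         return "Tick"
--     if style in _SIZEONLY_STYLES:
--         return "SizeOnly"
--     return "Unknown"
-- ===== SOURCE B (Python) =====
-- from typing import Any, Dict, List
--
-- _CLASS_TABLE = {
--     "Arrow": "Arrow",
--     "Heavy end tick mark": "Tick",
--     "Dot": "SizeOnly",
--     "Diagonal": "SizeOnly",
--     "Box": "SizeOnly",
--     "Loop": "SizeOnly",
--     "Elevation Target": "SizeOnly",
--     "Datum triangle": "SizeOnly",
-- }
--
-- def _detect_record_class(identity_items: List[Dict[str, Any]]) -> str:
--     # Scan BACK-TO-FRONT with an early return: the first ok 'arrowhead.style'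
--     # item seen from the end is the last one in original order, which is the
--     # one A's dict rebuild keeps; classify it immediately via one table lookup.
--     for item in reversed(identity_items):
--         if item.get("q") == "ok" and item.get("k") == "arrowhead.style":
--             return _CLASS_TABLE.get(item.get("v"), "Unknown")
--     return "Unknown"
-- ===== Notes on version B (the rewrite author's own statement) =====
-- stated objective: simpler
-- what changed: B replaces A's full kv-dict comprehension plus if-chain/frozenset classification by a back-to-front scan with an early return (the first ok 'arrowhead.style' item seen from the end is the last-wins one) classified through a single lookup table.
import Mathlib
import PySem

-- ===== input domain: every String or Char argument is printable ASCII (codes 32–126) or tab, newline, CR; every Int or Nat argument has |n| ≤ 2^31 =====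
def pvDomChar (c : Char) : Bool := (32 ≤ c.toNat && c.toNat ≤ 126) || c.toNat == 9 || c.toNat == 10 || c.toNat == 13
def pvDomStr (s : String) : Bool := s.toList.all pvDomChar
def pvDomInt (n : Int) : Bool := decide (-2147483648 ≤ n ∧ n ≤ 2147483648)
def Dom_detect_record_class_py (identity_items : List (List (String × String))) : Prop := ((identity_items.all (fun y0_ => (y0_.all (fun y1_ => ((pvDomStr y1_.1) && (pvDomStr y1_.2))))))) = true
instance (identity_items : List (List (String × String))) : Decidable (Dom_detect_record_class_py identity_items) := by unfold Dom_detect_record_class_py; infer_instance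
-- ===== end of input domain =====

-- B replaces A's "build the whole kv dict, then look one key up" by a back-to-front scan with
-- an early return, classifying the first match from the end via one lookup table (objective: simpler).

-- ===== PORT A =====
def pvSizeonlyStyles : PySem.Set String :=
  PySem.Set.ofList ["Dot", "Diagonal", "Box", "Loop", "Elevation Target", "Datum triangle"]

-- one step of A's dict comprehension (keys/values are Option String: item.get may be None)
def pvStepA (d : PySem.Dict (Option String) (Option String)) (item : List (String × String)) :
    PySem.Dict (Option String) (Option String) :=
  if (PySem.Dict.mk item).get? "q" == some "ok" then
    d.insert ((PySem.Dict.mk item).get? "k") ((PySem.Dict.mk item).get? "v")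
  else d

def detect_record_class_py (identity_items : List (List (String × String))) : String :=
  let kv := identity_items.foldl pvStepA PySem.Dict.empty
  let style := kv.getD (some "arrowhead.style") (some "")
  if style == some "Arrow" then "Arrow"
  else if style == some "Heavy end tick mark" then "Tick"
  else if (match style with
           | some s => PySem.Set.contains pvSizeonlyStyles s
           | none => false) then "SizeOnly"
  else "Unknown"

-- ===== PORT B =====
def pvClassTable : PySem.Dict String String := PySem.Dict.mk
  [("Arrow", "Arrow"), ("Heavy end tick mark", "Tick"),
   ("Dot", "SizeOnly"), ("Diagonal", "SizeOnly"), ("Box", "SizeOnly"), ("Loop", "SizeOnly"),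
   ("Elevation Target", "SizeOnly"), ("Datum triangle", "SizeOnly")]

-- B's loop over reversed(identity_items) with early return on the first match
def pvScanRev : List (List (String × String)) → String
  | [] => "Unknown"
  | item :: rest =>
    if (PySem.Dict.mk item).get? "q" == some "ok"
        && (PySem.Dict.mk item).get? "k" == some "arrowhead.style" then
      match (PySem.Dict.mk item).get? "v" with
      | some v => pvClassTable.getD v "Unknown"
      | none => "Unknown"
    else pvScanRev rest

def detect_record_class_py_alt (identity_items : List (List (String × String))) : String :=
  pvScanRev identity_items.reverse

-- ===== PRECONDITION & SPEC =====
def Spec_detect_record_class_py (identity_items : List (List (String × String))) (out : String) : Prop := out = detect_record_class_py_alt identity_items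
instance (identity_items : List (List (String × String))) (out : String) : Decidable (Spec_detect_record_class_py identity_items out) := by unfold Spec_detect_record_class_py; infer_instance

-- ===== CLAIM (what is proved, stated in full; the proofs are below) =====
def Claim_equal_detect_record_class_py : Prop := ∀ (identity_items : List (List (String × String))), Dom_detect_record_class_py identity_items → Spec_detect_record_class_py identity_items (detect_record_class_py identity_items)

-- ===== LEMMAS AND PROOFS =====

-- proof helpers: the last-wins value A keeps, and the first match of B's reversed scan
def pvStepLast (st : Option String) (item : List (String × String)) : Option String :=
  if (PySem.Dict.mk item).get? "q" == some "ok"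
      && (PySem.Dict.mk item).get? "k" == some "arrowhead.style" then
    (PySem.Dict.mk item).get? "v"
  else st

def pvFind : List (List (String × String)) → Option (Option String)
  | [] => none
  | item :: rest =>
    if (PySem.Dict.mk item).get? "q" == some "ok"
        && (PySem.Dict.mk item).get? "k" == some "arrowhead.style" then
      some ((PySem.Dict.mk item).get? "v")
    else pvFind rest

def pvClassifyOpt : Option String → String
  | some v => pvClassTable.getD v "Unknown"
  | none => "Unknown"

-- the "arrowhead.style" entry of A's accumulated dict is the last-wins fold
lemma foldl_stepA_key (items : List (List (String × String)))
    (d : PySem.Dict (Option String) (Option String)) :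
    (items.foldl pvStepA d).getD (some "arrowhead.style") (some "") =
      items.foldl pvStepLast (d.getD (some "arrowhead.style") (some "")) := by
  induction items generalizing d with
  | nil => rfl
  | cons item rest ih =>
    simp only [List.foldl_cons]
    rw [ih]
    congr 1
    unfold pvStepA pvStepLast
    by_cases hq : (PySem.Dict.mk item).get? "q" = some "ok"
    · by_cases hk : (PySem.Dict.mk item).get? "k" = some "arrowhead.style"
      · simp [hq, hk, PySem.Dict.getD_insert_self]
      · simp [hq, hk, PySem.Dict.getD_insert, Ne.symm hk]
    · simp [hq]

-- B's reversed scan is the classification of its first match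
lemma scanRev_eq_find (l : List (List (String × String))) :
    pvScanRev l = (match pvFind l with
                   | some s => pvClassifyOpt s
                   | none => "Unknown") := by
  induction l with
  | nil => rfl
  | cons item rest ih =>
    unfold pvScanRev pvFind
    split_ifs with h
    · cases hv : (PySem.Dict.mk item).get? "v" <;> simp [pvClassifyOpt]
    · simpa using ih

lemma find_append (l l' : List (List (String × String))) :
    pvFind (l ++ l') = (match pvFind l with
                        | some s => some s
                        | none => pvFind l') := by
  induction l with
  | nil => rfl
  | cons item rest ih =>
    by_cases h : ((PySem.Dict.mk item).get? "q" == some "ok"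
        && (PySem.Dict.mk item).get? "k" == some "arrowhead.style") = true
    · simp [pvFind, h]
    · simp [pvFind, h, ih]

-- last-wins forward fold = first match of the reversed list (or the initial value)
lemma foldl_stepLast_eq_find (items : List (List (String × String))) (init : Option String) :
    items.foldl pvStepLast init =
      (match pvFind items.reverse with
       | some s => s
       | none => init) := by
  induction items generalizing init with
  | nil => rfl
  | cons item rest ih =>
    simp only [List.foldl_cons, List.reverse_cons]
    rw [ih, find_append]
    cases h : pvFind rest.reverse
    · unfold pvFind pvStepLast
      split_ifs with hc <;> simp [pvFind]
    · rfl

-- the two classification tails agree on every style value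
lemma classify_eq (s : Option String) :
    (if s == some "Arrow" then "Arrow"
     else if s == some "Heavy end tick mark" then "Tick"
     else if (match s with
              | some t => PySem.Set.contains pvSizeonlyStyles t
              | none => false) then "SizeOnly"
     else "Unknown")
    = pvClassifyOpt s := by
  cases s with
  | none => rfl
  | some t =>
    by_cases h1 : t = "Arrow"
    · subst h1; decide
    by_cases h2 : t = "Heavy end tick mark"
    · subst h2; decide
    by_cases h3 : t = "Dot"
    · subst h3; decide
    by_cases h4 : t = "Diagonal"
    · subst h4; decide
    by_cases h5 : t = "Box"
    · subst h5; decide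
    by_cases h6 : t = "Loop"
    · subst h6; decide
    by_cases h7 : t = "Elevation Target"
    · subst h7; decide
    by_cases h8 : t = "Datum triangle"
    · subst h8; decide
    simp [pvClassifyOpt, pvClassTable, pvSizeonlyStyles, PySem.Dict.getD,
          PySem.Dict.get?, h1, h2, h3, h4, h5, h6, h7, h8,
          Ne.symm h1, Ne.symm h2, Ne.symm h3, Ne.symm h4, Ne.symm h5, Ne.symm h6,
          Ne.symm h7, Ne.symm h8]

-- ===== VERDICT (by name: the statement is the Claim_ definition above) =====
theorem detect_record_class_py_spec : Claim_equal_detect_record_class_py := by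
  intro identity_items _
  unfold Spec_detect_record_class_py detect_record_class_py detect_record_class_py_alt
  simp only [foldl_stepA_key, PySem.Dict.getD_empty, foldl_stepLast_eq_find, scanRev_eq_find]
  cases h : pvFind identity_items.reverse with
  | none => exact (classify_eq (some "")).trans (by decide)
  | some s => exact classify_eq s
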